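-- pv_equiv track=rewrite | github.com/riku546/python | atcoder/ABC150/C.py | count_order
-- ===== SOURCE A (Python) =====
-- import itertools
--
-- def count_order(N, P, Q):
--     N_array = [n for n in range(1, N + 1)]
--     permutations_N = itertools.permutations(N_array)
--     result_p = 0
--     result_q = 0
--     for i, permutation in enumerate(permutations_N):
--
--         if permutation == P:
--             result_p = i + 1
--
--         if permutation == Q:
--             result_q = i + 1
--
--     return abs(result_q - result_p)
-- ===== SOURCE B (Python) =====
-- def count_order(N, P, Q):
--     def rank(X):
--         # lexicographic 1-based rank of X among the permutations of 1..N; 0 if X is not one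
--         r = range(1, N + 1)
--         if len(X) != len(r):
--             return 0
--         if sorted(X) != list(r):
--             return 0
--         n = len(X)
--         res = 0
--         f = 1  # (n - 1 - i)! built up from the right
--         for i in range(n - 1, -1, -1):
--             c = sum(1 for y in X[i + 1:] if y < X[i])
--             res += c * f
--             f *= n - i
--         return res + 1
--     return abs(rank(Q) - rank(P))
-- ===== Notes on version B (the rewrite author's own statement) =====
-- stated objective: alternative
-- what changed: B computes each sequence's lexicographic rank directly from its Lehmer code (factorial number system) in O(N^2), instead of enumerating all N! permutations and scanning for matches.
import Mathlib
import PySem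

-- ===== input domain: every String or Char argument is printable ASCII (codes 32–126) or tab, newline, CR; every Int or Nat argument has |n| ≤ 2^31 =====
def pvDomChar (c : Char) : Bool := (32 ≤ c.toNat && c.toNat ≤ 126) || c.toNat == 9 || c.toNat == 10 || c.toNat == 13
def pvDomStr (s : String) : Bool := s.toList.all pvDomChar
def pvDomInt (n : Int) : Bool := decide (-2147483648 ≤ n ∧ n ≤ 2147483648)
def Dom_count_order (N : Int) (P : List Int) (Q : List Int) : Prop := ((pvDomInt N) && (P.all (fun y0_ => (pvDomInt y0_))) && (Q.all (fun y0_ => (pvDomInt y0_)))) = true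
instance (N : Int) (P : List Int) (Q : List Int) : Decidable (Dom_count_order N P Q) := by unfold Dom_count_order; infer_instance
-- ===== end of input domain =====

-- B computes each rank directly via its Lehmer code (factorial number system) instead of
-- scanning all N! permutations; same return value, different algorithm.

-- ===== PORT A =====
-- itertools.permutations(xs): pick each next element by ascending index into the
-- remaining list (exactly itertools' emission order); fuel = length of the list.
def pvPermsAux : Nat → List Int → List (List Int)
  | 0, _ => [[]]
  | n + 1, xs =>
    (List.range xs.length).flatMap (fun i =>
      (pvPermsAux n (xs.eraseIdx i)).map (fun p => xs.getD i 0 :: p))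

def pvPerms (xs : List Int) : List (List Int) := pvPermsAux xs.length xs

-- the `for i, permutation in enumerate(...)` loop carries the running index i in the
-- fold state (a lazy enumerate; the permutations are consumed one by one)
def count_order (N : Int) (P : List Int) (Q : List Int) : Int :=
  let N_array := PySem.List.pyRange 1 (N + 1) 1
  let permutations_N := pvPerms N_array
  let res := permutations_N.foldl
    (fun (acc : Int × Int × Int) (permutation : List Int) =>
      (acc.1 + 1,
       (if permutation == P then acc.1 + 1 else acc.2.1),
       (if permutation == Q then acc.1 + 1 else acc.2.2))) (0, 0, 0)
  |res.2.2 - res.2.1|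

-- ===== PORT B =====
-- rank(X): lexicographic 1-based rank of X among the permutations of 1..N, 0 if X is
-- not one (len(range(1, N+1)) is N.toNat; the two `return 0` guards are the two elses).
def pvRank (N : Int) (X : List Int) : Int :=
  if X.length == N.toNat then
    if PySem.List.sorted X (fun x => x) == PySem.List.pyRange 1 (N + 1) 1 then
      let n : Int := X.length
      let res := (PySem.List.pyRange (n - 1) (-1) (-1)).foldl
        (fun (acc : Int × Int) (i : Int) =>
          (acc.1 + (((PySem.List.slice X (some (i + 1)) none).countP
              (fun y => y < PySem.List.pyGetD X i 0) : Nat) : Int) * acc.2,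
           acc.2 * (n - i))) (0, 1)
      res.1 + 1
    else 0
  else 0

def count_order_alt (N : Int) (P : List Int) (Q : List Int) : Int :=
  |pvRank N Q - pvRank N P|

-- ===== PRECONDITION & SPEC =====
def Spec_count_order (N : Int) (P : List Int) (Q : List Int) (out : Int) : Prop := out = count_order_alt N P Q
instance (N : Int) (P : List Int) (Q : List Int) (out : Int) : Decidable (Spec_count_order N P Q out) := by unfold Spec_count_order; infer_instance

-- ===== CLAIM (what is proved, stated in full; the proofs are below) =====
def Claim_equal_count_order : Prop := ∀ (N : Int) (P : List Int) (Q : List Int), Dom_count_order N P Q → Spec_count_order N P Q (count_order N P Q)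

-- ===== LEMMAS AND PROOFS =====

-- the Lehmer number of a list: Σ_i (#{j > i | X[j] < X[i]}) * (n-1-i)!
def pvLehmer : List Int → Int
  | [] => 0
  | x :: t => ((t.countP (fun y => y < x) : Nat) : Int) * ((t.length.factorial : Nat) : Int) + pvLehmer t

theorem pvPermsAux_length : ∀ (n : Nat) (xs : List Int), xs.length = n →
    (pvPermsAux n xs).length = n.factorial := by
  intro n
  induction n with
  | zero => intro xs _; rfl
  | succ n ih =>
    intro xs hlen
    simp only [pvPermsAux, List.length_flatMap]
    have hmap : (List.range xs.length).map
        (fun i => ((pvPermsAux n (xs.eraseIdx i)).map (fun p => xs.getD i 0 :: p)).length)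
        = (List.range xs.length).map (fun _ => n.factorial) := by
      apply List.map_congr_left
      intro i hi
      have hilt : i < xs.length := List.mem_range.mp hi
      rw [List.length_map, ih (xs.eraseIdx i) (by rw [List.length_eraseIdx_of_lt hilt]; omega)]
    rw [hmap]
    simp [List.map_const', hlen, Nat.factorial_succ, Nat.mul_comm]

theorem mem_pvPermsAux : ∀ (n : Nat) (xs p : List Int), xs.length = n →
    (p ∈ pvPermsAux n xs ↔ p.Perm xs) := by
  intro n
  induction n with
  | zero =>
    intro xs p hlen
    rw [List.length_eq_zero_iff] at hlen
    subst hlen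
    simp [pvPermsAux, List.perm_nil]
  | succ n ih =>
    intro xs p hlen
    simp only [pvPermsAux, List.mem_flatMap, List.mem_map, List.mem_range]
    constructor
    · rintro ⟨i, hi, q, hq, rfl⟩
      have hq' : q.Perm (xs.eraseIdx i) :=
        (ih (xs.eraseIdx i) q (by rw [List.length_eraseIdx_of_lt hi]; omega)).mp hq
      have hsplit : xs.Perm (xs.getD i 0 :: xs.eraseIdx i) := by
        rw [List.getD_eq_getElem xs 0 hi, List.eraseIdx_eq_take_drop_succ]
        have h1 : xs = xs.take i ++ xs[i] :: xs.drop (i + 1) := by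
          conv_lhs => rw [← List.take_append_drop i xs]
          rw [List.getElem_cons_drop]
        conv_lhs => rw [h1]
        exact List.perm_middle
      exact (hq'.cons (xs.getD i 0)).trans hsplit.symm
    · intro hp
      have hpne : p ≠ [] := by
        intro h; subst h
        have := hp.length_eq; simp [hlen] at this
      obtain ⟨x, rest, rfl⟩ := List.exists_cons_of_ne_nil hpne
      have hx : x ∈ xs := hp.mem_iff.mp (List.mem_cons_self)
      have hj : xs.idxOf x < xs.length := List.idxOf_lt_length_of_mem hx
      refine ⟨xs.idxOf x, hj, rest, ?_, ?_⟩
      · apply (ih _ rest (by rw [List.length_eraseIdx_of_lt hj]; omega)).mpr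
        rw [List.eraseIdx_idxOf_eq_erase]
        exact (List.cons_perm_iff_perm_erase.mp hp).2
      · rw [List.getD_eq_getElem xs 0 hj, List.getElem_idxOf hj]

theorem nodup_pvPermsAux : ∀ (n : Nat) (xs : List Int), xs.length = n → xs.Nodup →
    (pvPermsAux n xs).Nodup := by
  intro n
  induction n with
  | zero => intro xs _ _; simp [pvPermsAux]
  | succ n ih =>
    intro xs hlen hnd
    simp only [pvPermsAux]
    rw [List.nodup_flatMap]
    constructor
    · intro i hi
      have hilt : i < xs.length := List.mem_range.mp hi
      apply List.Nodup.map
      · intro a b h; injection h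
      · exact ih (xs.eraseIdx i) (by rw [List.length_eraseIdx_of_lt hilt]; omega)
          (hnd.sublist (List.eraseIdx_sublist xs i))
    · rw [List.pairwise_iff_getElem]
      intro a b ha hb hab
      simp only [List.length_range] at ha hb
      simp only [List.getElem_range]
      intro p hpa hpb
      simp only [List.mem_map] at hpa hpb
      obtain ⟨qa, _, rfl⟩ := hpa
      obtain ⟨qb, _, h⟩ := hpb
      have hhead : xs.getD b 0 = xs.getD a 0 := by injection h
      rw [List.getD_eq_getElem xs 0 ha, List.getD_eq_getElem xs 0 hb] at hhead
      exact absurd (hnd.getElem_inj_iff.mp hhead.symm) (by omega)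

theorem pv_idxOf_map_cons (x : Int) (r : List Int) (L : List (List Int)) :
    (L.map (fun p => x :: p)).idxOf (x :: r) = L.idxOf r := by
  induction L with
  | nil => rfl
  | cons q L ih =>
    by_cases hq : q = r
    · subst hq; simp [List.idxOf_cons_eq]
    · rw [List.map_cons, List.idxOf_cons_ne _ (by simp [hq]), List.idxOf_cons_ne _ hq, ih]

theorem pv_idxOf_flatMap_range (b : List Int) : ∀ (j : Nat) (f : Nat → List (List Int)) (m : Nat),
    j < m → b ∈ f j → (∀ k, k < j → b ∉ f k) →
    ((List.range m).flatMap f).idxOf b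
      = ((List.range j).map (fun k => (f k).length)).sum + (f j).idxOf b := by
  intro j
  induction j with
  | zero =>
    intro f m hm hb _
    obtain ⟨m', rfl⟩ := Nat.exists_eq_succ_of_ne_zero (by omega : m ≠ 0)
    rw [List.range_succ_eq_map, List.flatMap_cons]
    simp [List.idxOf_append_of_mem hb]
  | succ j ih =>
    intro f m hm hb habs
    obtain ⟨m', rfl⟩ := Nat.exists_eq_succ_of_ne_zero (by omega : m ≠ 0)
    rw [List.range_succ_eq_map, List.flatMap_cons,
        List.idxOf_append_of_notMem (habs 0 (by omega)), List.flatMap_map]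
    rw [ih (fun k => f (k + 1)) m' (by omega) (by simpa using hb)
        (fun k hk => habs (k + 1) (by omega))]
    rw [List.range_succ_eq_map, List.map_cons, List.sum_cons, List.map_map]
    simp [Function.comp_def]
    omega

-- in a strictly increasing list, the index of a member is the number of smaller elements
theorem pv_countP_sorted (xs : List Int) (x : Int) (hpair : xs.Pairwise (· < ·)) (hx : x ∈ xs) :
    xs.countP (fun y => decide (y < x)) = xs.idxOf x := by
  induction xs with
  | nil => simp at hx
  | cons a t ih =>
    rw [List.pairwise_cons] at hpair
    rcases List.mem_cons.mp hx with rfl | hxt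
    · rw [List.idxOf_cons_eq _ rfl, List.countP_cons]
      simp only [decide_eq_true_eq, lt_self_iff_false, if_false, add_zero]
      apply List.countP_eq_zero.mpr
      intro y hy
      simp only [decide_eq_true_eq, not_lt]
      exact le_of_lt (hpair.1 y hy)
    · have hax : a ≠ x := fun h => absurd (h ▸ hpair.1 x hxt) (lt_irrefl _)
      rw [List.idxOf_cons_ne _ hax, List.countP_cons]
      simp only [decide_eq_true_eq, hpair.1 x hxt, if_true]
      rw [ih hpair.2 hxt]

-- MAIN: the index of a permutation X in A's enumeration is X's Lehmer number
theorem pv_idx_eq_lehmer : ∀ (n : Nat) (xs X : List Int), xs.length = n →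
    xs.Pairwise (· < ·) → X.Perm xs →
    (((pvPermsAux n xs).idxOf X : Nat) : Int) = pvLehmer X := by
  intro n
  induction n with
  | zero =>
    intro xs X hlen _ hperm
    rw [List.length_eq_zero_iff] at hlen
    subst hlen
    rw [List.perm_nil] at hperm
    subst hperm
    rfl
  | succ n ih =>
    intro xs X hlen hpair hperm
    have hnd : xs.Nodup := hpair.imp ne_of_lt
    have hXne : X ≠ [] := by
      intro h; subst h
      have := hperm.length_eq; simp [hlen] at this
    obtain ⟨x, rest, rfl⟩ := List.exists_cons_of_ne_nil hXne
    have hx : x ∈ xs := hperm.mem_iff.mp (List.mem_cons_self)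
    set j := xs.idxOf x with hjdef
    have hj : j < xs.length := List.idxOf_lt_length_of_mem hx
    have hxj : xs[j] = x := List.getElem_idxOf hj
    have hrest : rest.Perm (xs.eraseIdx j) := by
      rw [hjdef, List.eraseIdx_idxOf_eq_erase]
      exact (List.cons_perm_iff_perm_erase.mp hperm).2
    have hlen' : (xs.eraseIdx j).length = n := by rw [List.length_eraseIdx_of_lt hj]; omega
    have hblock : (x :: rest) ∈ (pvPermsAux n (xs.eraseIdx j)).map (fun p => xs.getD j 0 :: p) := by
      rw [List.getD_eq_getElem xs 0 hj, hxj]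
      exact List.mem_map.mpr ⟨rest, (mem_pvPermsAux n _ rest hlen').mpr hrest, rfl⟩
    simp only [pvPermsAux]
    rw [pv_idxOf_flatMap_range (x :: rest) j _ xs.length (by omega) hblock ?habs]
    case habs =>
      intro k hk hmem
      simp only [List.mem_map] at hmem
      obtain ⟨q, _, h⟩ := hmem
      have : xs.getD k 0 = x := by injection h
      rw [List.getD_eq_getElem xs 0 (by omega)] at this
      exact absurd (hnd.getElem_inj_iff.mp (this.trans hxj.symm)) (by omega)
    · -- sum of the first j block lengths is j * n!
      have hsum : ((List.range j).map
          (fun k => ((pvPermsAux n (xs.eraseIdx k)).map (fun p => xs.getD k 0 :: p)).length)).sum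
          = j * n.factorial := by
        have : (List.range j).map
            (fun k => ((pvPermsAux n (xs.eraseIdx k)).map (fun p => xs.getD k 0 :: p)).length)
            = (List.range j).map (fun _ => n.factorial) := by
          apply List.map_congr_left
          intro k hk
          have hklt : k < xs.length := by have := List.mem_range.mp hk; omega
          rw [List.length_map, pvPermsAux_length n _ (by rw [List.length_eraseIdx_of_lt hklt]; omega)]
        rw [this]; simp [List.map_const']
      rw [hsum]
      have hidxrest : ((pvPermsAux n (xs.eraseIdx j)).map (fun p => xs.getD j 0 :: p)).idxOf (x :: rest)
          = (pvPermsAux n (xs.eraseIdx j)).idxOf rest := by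
        rw [List.getD_eq_getElem xs 0 hj, hxj, pv_idxOf_map_cons]
      rw [hidxrest]
      have hIH : (((pvPermsAux n (xs.eraseIdx j)).idxOf rest : Nat) : Int) = pvLehmer rest :=
        ih (xs.eraseIdx j) rest hlen' (hpair.sublist (List.eraseIdx_sublist xs j)) hrest
      -- count of smaller elements in the tail is j
      have hcount : rest.countP (fun y => decide (y < x)) = j := by
        have h1 : rest.countP (fun y => decide (y < x)) = (xs.erase x).countP (fun y => decide (y < x)) :=
          List.Perm.countP_eq _ (by rw [hjdef, List.eraseIdx_idxOf_eq_erase] at hrest; exact hrest)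
        have h2 : xs.countP (fun y => decide (y < x))
            = (x :: xs.erase x).countP (fun y => decide (y < x)) :=
          List.Perm.countP_eq _ (List.perm_cons_erase hx)
        rw [List.countP_cons] at h2
        simp only [decide_eq_true_eq, lt_self_iff_false, if_false, add_zero] at h2
        rw [h1, ← h2, pv_countP_sorted xs x hpair hx]
      have hrlen : rest.length = n := by
        have := hrest.length_eq; omega
      simp only [pvLehmer, hcount, hrlen]
      push_cast [← hIH]
      ring
    
-- A's accumulator loop returns (index of the last occurrence) + 1, i.e. for a nodup
-- list: start + idxOf + 1 if present, the initial value otherwise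
theorem pv_scan (X : List Int) : ∀ (l : List (List Int)) (s a : Int), l.Nodup →
    (l.foldl (fun (acc : Int × Int) (p : List Int) =>
        (acc.1 + 1, if p == X then acc.1 + 1 else acc.2)) (s, a)).2
    = if X ∈ l then s + ((l.idxOf X : Nat) : Int) + 1 else a := by
  intro l
  induction l with
  | nil => intro s a _; simp
  | cons c t ih =>
    intro s a hnd
    rw [List.foldl_cons]
    rw [List.nodup_cons] at hnd
    by_cases hc : c = X
    · subst hc
      simp only [beq_self_eq_true, if_true]
      rw [ih (s + 1) (s + 1) hnd.2, if_neg hnd.1, if_pos List.mem_cons_self,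
          List.idxOf_cons_eq t rfl]
      simp
    · rw [show (c == X) = false from beq_eq_false_iff_ne.mpr hc]
      simp only [Bool.false_eq_true, if_false]
      rw [ih (s + 1) a hnd.2]
      by_cases hXt : X ∈ t
      · rw [if_pos hXt, if_pos (List.mem_cons.mpr (Or.inr hXt)), List.idxOf_cons_ne t hc]
        push_cast
        ring
      · rw [if_neg hXt,
            if_neg (by simp only [List.mem_cons, hXt, or_false]; exact fun h => hc h.symm)]

theorem pv_foldl_split (P Q : List Int) : ∀ (l : List (List Int)) (s a b : Int),
    l.foldl (fun (acc : Int × Int × Int) (permutation : List Int) =>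
      (acc.1 + 1,
       (if permutation == P then acc.1 + 1 else acc.2.1),
       (if permutation == Q then acc.1 + 1 else acc.2.2))) (s, a, b)
    = ((l.foldl (fun (acc : Int × Int) (p : List Int) =>
          (acc.1 + 1, if p == P then acc.1 + 1 else acc.2)) (s, a)).1,
       (l.foldl (fun (acc : Int × Int) (p : List Int) =>
          (acc.1 + 1, if p == P then acc.1 + 1 else acc.2)) (s, a)).2,
       (l.foldl (fun (acc : Int × Int) (p : List Int) =>
          (acc.1 + 1, if p == Q then acc.1 + 1 else acc.2)) (s, b)).2) := by
  intro l
  induction l with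
  | nil => intro s a b; rfl
  | cons x t ih =>
    intro s a b
    simp only [List.foldl_cons]
    exact ih _ _ _

-- B's right-to-left loop computes (Lehmer number, length!)
theorem pv_loop (X : List Int) :
    (PySem.List.pyRange ((X.length : Int) - 1) (-1) (-1)).foldl
      (fun (acc : Int × Int) (i : Int) =>
        (acc.1 + (((PySem.List.slice X (some (i + 1)) none).countP
            (fun y => y < PySem.List.pyGetD X i 0) : Nat) : Int) * acc.2,
         acc.2 * ((X.length : Int) - i))) (0, 1)
    = (pvLehmer X, ((X.length.factorial : Nat) : Int)) := by
  induction X with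
  | nil => rw [PySem.List.pyRange_neg_one_eq_nil (by norm_num)]; rfl
  | cons x t ih =>
    rw [PySem.List.pyRange_neg_one]
    have htn : (((x :: t).length : Int) - 1 - (-1)).toNat = t.length + 1 := by
      simp
    rw [htn, List.range_succ, List.map_append, List.foldl_append]
    -- the first t.length steps coincide with t's loop
    have hpref : (List.foldl
        (fun (acc : Int × Int) (i : Int) =>
          (acc.1 + (((PySem.List.slice (x :: t) (some (i + 1)) none).countP
              (fun y => y < PySem.List.pyGetD (x :: t) i 0) : Nat) : Int) * acc.2,
           acc.2 * (((x :: t).length : Int) - i))) (0, 1)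
        ((List.range t.length).map (fun (k : Nat) => ((x :: t).length : Int) - 1 - (k : Int))))
        = (pvLehmer t, ((t.length.factorial : Nat) : Int)) := by
      rw [List.foldl_map]
      conv_rhs => rw [← ih, PySem.List.pyRange_neg_one,
        show ((t.length : Int) - 1 - (-1)).toNat = t.length by omega, List.foldl_map]
      apply PySem.List.foldl_congr_mem
      intro acc k hk
      have hklt : k < t.length := List.mem_range.mp hk
      have he1 : ((x :: t).length : Int) - 1 - (k : Int) = (((t.length - k : Nat) : Nat) : Int) := by
        simp; omega
      have he2 : ((t.length : Int)) - 1 - (k : Int) = (((t.length - 1 - k : Nat) : Nat) : Int) := by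
        omega
      rw [he1, he2]
      have hmk : t.length - k = (t.length - 1 - k) + 1 := by omega
      rw [hmk]
      set m : Nat := t.length - 1 - k with hm
      have hslice : PySem.List.slice (x :: t) (some (((m + 1 : Nat) : Int) + 1)) none
          = PySem.List.slice t (some (((m : Nat) : Int) + 1)) none := by
        rw [show (((m + 1 : Nat) : Int) + 1) = (((m + 2 : Nat) : Nat) : Int) by push_cast; ring,
            show (((m : Nat) : Int) + 1) = (((m + 1 : Nat) : Nat) : Int) by push_cast; ring,
            PySem.List.slice_from _ (by positivity), PySem.List.slice_from _ (by positivity)]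
        rw [show (((m + 2 : Nat) : Int)).toNat = m + 2 by omega,
            show (((m + 1 : Nat) : Int)).toNat = m + 1 by omega, List.drop_succ_cons]
      have hget : PySem.List.pyGetD (x :: t) ((m + 1 : Nat) : Int) 0
          = PySem.List.pyGetD t ((m : Nat) : Int) 0 := by
        rw [PySem.List.pyGetD_natCast, PySem.List.pyGetD_natCast, List.getD_cons_succ]
      have hmul : ((x :: t).length : Int) - ((m + 1 : Nat) : Int)
          = ((t.length : Int)) - ((m : Nat) : Int) := by
        simp only [List.length_cons]; push_cast; ring
      rw [hslice, hget, hmul]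
    rw [hpref]
    -- final step: position 0
    have hz : ((x :: t).length : Int) - 1 - ((t.length : Nat) : Int) = 0 := by simp
    simp only [List.map_cons, List.map_nil, List.foldl_cons, List.foldl_nil, hz]
    rw [show ((0 : Int) + 1) = (1 : Int) by norm_num, PySem.List.slice_from_one,
        show ((0 : Int)) = (((0 : Nat) : Nat) : Int) by norm_num, PySem.List.pyGetD_natCast]
    simp only [List.tail_cons, List.getD_cons_zero]
    refine Prod.ext ?_ ?_
    · simp only [pvLehmer]; ring
    · simp only [List.length_cons, Nat.factorial_succ]
      push_cast
      ring

-- B's rank in closed form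
theorem pvRank_eq (N : Int) (X : List Int) :
    pvRank N X = if X.Perm (PySem.List.pyRange 1 (N + 1) 1) then pvLehmer X + 1 else 0 := by
  have hrange : (PySem.List.pyRange 1 (N + 1) 1).length = N.toNat := by
    rw [PySem.List.length_pyRange_one]; congr 1; ring
  by_cases hperm : X.Perm (PySem.List.pyRange 1 (N + 1) 1)
  · have hlen : X.length = N.toNat := by rw [hperm.length_eq, hrange]
    have hsorted : PySem.List.sorted X (fun x => x) = PySem.List.pyRange 1 (N + 1) 1 :=
      PySem.List.sorted_eq_of_perm_of_pairwise_lt X _ _ hperm.symm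
        (PySem.List.pairwise_lt_pyRange_one 1 (N + 1))
    unfold pvRank
    rw [if_pos (by simpa using hlen), if_pos (by simpa using hsorted)]
    simp only [pv_loop X, hperm, if_true]
  · rw [if_neg hperm]
    unfold pvRank
    by_cases h1 : X.length = N.toNat
    · rw [if_pos (by simpa using h1)]
      by_cases h2 : PySem.List.sorted X (fun x => x) = PySem.List.pyRange 1 (N + 1) 1
      · exfalso
        apply hperm
        rw [← PySem.List.sorted_id_eq_sorted_id_iff_perm]
        rw [h2, PySem.List.sorted_eq_self_of_pairwise _ _
          ((PySem.List.pairwise_lt_pyRange_one 1 (N + 1)).imp le_of_lt)]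
      · rw [if_neg (by simpa using h2)]
    · rw [if_neg (by simpa using h1)]

-- ===== VERDICT (by name: the statement is the Claim_ definition above) =====
theorem count_order_spec : Claim_equal_count_order := by
  intro N P Q _
  unfold Spec_count_order
  simp only [count_order, count_order_alt]
  have hpair : (PySem.List.pyRange 1 (N + 1) 1).Pairwise (· < ·) :=
    PySem.List.pairwise_lt_pyRange_one 1 (N + 1)
  have hnd : (pvPerms (PySem.List.pyRange 1 (N + 1) 1)).Nodup :=
    nodup_pvPermsAux _ _ rfl (hpair.imp ne_of_lt)
  have hrank : ∀ R : List Int,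
      (if R ∈ pvPerms (PySem.List.pyRange 1 (N + 1) 1) then
        (0 : Int) + (((pvPerms (PySem.List.pyRange 1 (N + 1) 1)).idxOf R : Nat) : Int) + 1
      else 0) = pvRank N R := by
    intro R
    rw [pvRank_eq]
    by_cases hmem : R ∈ pvPerms (PySem.List.pyRange 1 (N + 1) 1)
    · have hperm : R.Perm (PySem.List.pyRange 1 (N + 1) 1) :=
        (mem_pvPermsAux _ _ R rfl).mp hmem
      rw [if_pos hmem, if_pos hperm]
      have := pv_idx_eq_lehmer ((PySem.List.pyRange 1 (N + 1) 1).length)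
        (PySem.List.pyRange 1 (N + 1) 1) R rfl hpair hperm
      rw [show (pvPerms (PySem.List.pyRange 1 (N + 1) 1)).idxOf R
            = (pvPermsAux ((PySem.List.pyRange 1 (N + 1) 1).length)
                (PySem.List.pyRange 1 (N + 1) 1)).idxOf R from rfl, this]
      ring
    · rw [if_neg hmem, if_neg (fun hperm => hmem ((mem_pvPermsAux _ _ R rfl).mpr hperm))]
  rw [pv_foldl_split P Q, pv_scan P _ 0 0 hnd, pv_scan Q _ 0 0 hnd, hrank P, hrank Q]
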